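-- pv_equiv track=rewrite | github.com/RBenOthmen/AutoCorrectGPT | pdf_generator.py | analyze_breakdown_structure
-- ===== SOURCE A (Python) =====
-- def analyze_breakdown_structure(breakdown_item):
--     """Analyze the structure of grading breakdown items"""
--     if not breakdown_item:
--         return {}
--
--     structure = {
--         'element': [],
--         'max_points': [],
--         'score': [],
--         'justification': []
--     }
--
--     first_element = breakdown_item[0] if breakdown_item else {}
--
--     for key in first_element.keys():
--         key_lower = key.lower()
--
--         if any(pattern in key_lower for pattern in ['element', 'criterion', 'rubric', 'part']):
--             structure['element'].append(key)
--         elif any(pattern in key_lower for pattern in ['max', 'maximum', 'total']):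
--             structure['max_points'].append(key)
--         elif any(pattern in key_lower for pattern in ['score', 'student', 'points', 'earned']):
--             structure['score'].append(key)
--         elif any(pattern in key_lower for pattern in ['justification', 'reason', 'comment', 'feedback']):
--             structure['justification'].append(key)
--
--     return structure
-- ===== SOURCE B (Python) =====
-- _CATEGORIES = [
--     ('element', ['element', 'criterion', 'rubric', 'part']),
--     ('max_points', ['max', 'maximum', 'total']),
--     ('score', ['score', 'student', 'points', 'earned']),
--     ('justification', ['justification', 'reason', 'comment', 'feedback']),
-- ]
--
--
-- def _classify(key):
--     kl = key.lower()
--     return next((cat for cat, pats in _CATEGORIES if any(p in kl for p in pats)), None)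
--
--
-- def analyze_breakdown_structure(breakdown_item):
--     if not breakdown_item:
--         return {}
--     keys = list(breakdown_item[0].keys())
--     return {cat: [k for k in keys if _classify(k) == cat] for cat, _ in _CATEGORIES}
-- ===== Notes on version B (the rewrite author's own statement) =====
-- stated objective: simpler
-- what changed: Replaces the per-key elif-cascade that mutates a pre-built dict with a declarative (category, patterns) table, a shared first-match classifier, and one filter comprehension per category building the result dict directly.
import Mathlib
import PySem

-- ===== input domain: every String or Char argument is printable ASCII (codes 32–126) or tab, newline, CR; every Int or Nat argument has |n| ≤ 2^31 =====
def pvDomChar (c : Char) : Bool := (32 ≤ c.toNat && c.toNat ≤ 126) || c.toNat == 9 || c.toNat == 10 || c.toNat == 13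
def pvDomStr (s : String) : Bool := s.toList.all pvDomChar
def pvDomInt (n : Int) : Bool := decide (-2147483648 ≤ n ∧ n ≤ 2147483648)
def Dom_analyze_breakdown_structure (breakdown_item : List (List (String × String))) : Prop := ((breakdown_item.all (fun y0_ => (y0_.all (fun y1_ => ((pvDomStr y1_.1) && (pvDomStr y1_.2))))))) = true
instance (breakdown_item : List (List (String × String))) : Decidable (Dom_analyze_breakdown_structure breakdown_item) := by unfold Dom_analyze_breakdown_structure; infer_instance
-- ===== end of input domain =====

-- B replaces A's per-key elif-cascade into a mutated dict by a per-category filter over a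
-- (category, patterns) table with a shared first-match classifier (objective: simpler decomposition).


-- ===== PORT A =====
-- any(pattern in key_lower for pattern in pats)
def pvAnyIn (pats : List String) (kl : String) : Bool := pats.any fun p => PySem.Str.isIn p kl

-- the body of A's for-loop: the elif-cascade appending `key` to one bucket of the dict
def pvStepA (d : PySem.Dict String (List String)) (key : String) : PySem.Dict String (List String) :=
  let key_lower := PySem.Str.lower key
  if pvAnyIn ["element", "criterion", "rubric", "part"] key_lower then
    d.modify "element" [] (fun l => l ++ [key])
  else if pvAnyIn ["max", "maximum", "total"] key_lower then
    d.modify "max_points" [] (fun l => l ++ [key])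
  else if pvAnyIn ["score", "student", "points", "earned"] key_lower then
    d.modify "score" [] (fun l => l ++ [key])
  else if pvAnyIn ["justification", "reason", "comment", "feedback"] key_lower then
    d.modify "justification" [] (fun l => l ++ [key])
  else d

def analyze_breakdown_structure (breakdown_item : List (List (String × String))) : List (String × List String) :=
  match breakdown_item with
  | [] => []
  | first :: _ =>
    let structure0 : PySem.Dict String (List String) :=
      PySem.Dict.ofList [("element", []), ("max_points", []), ("score", []), ("justification", [])]
    let first_element : PySem.Dict String String := PySem.Dict.ofList first
    (first_element.keys.foldl pvStepA structure0).items

-- ===== PORT B =====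
def pvCategories : List (String × List String) :=
  [("element", ["element", "criterion", "rubric", "part"]),
   ("max_points", ["max", "maximum", "total"]),
   ("score", ["score", "student", "points", "earned"]),
   ("justification", ["justification", "reason", "comment", "feedback"])]

def pvClassify (key : String) : Option String :=
  let kl := PySem.Str.lower key
  (pvCategories.find? (fun cp => pvAnyIn cp.2 kl)).map (·.1)

def analyze_breakdown_structure_alt (breakdown_item : List (List (String × String))) : List (String × List String) :=
  match breakdown_item with
  | [] => []
  | first :: _ =>
    let keys := (PySem.Dict.ofList first : PySem.Dict String String).keys
    pvCategories.map fun cp => (cp.1, keys.filter fun k => pvClassify k == some cp.1)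

-- ===== PRECONDITION & SPEC =====
def Spec_analyze_breakdown_structure (breakdown_item : List (List (String × String))) (out : List (String × List String)) : Prop := out = analyze_breakdown_structure_alt breakdown_item
instance (breakdown_item : List (List (String × String))) (out : List (String × List String)) : Decidable (Spec_analyze_breakdown_structure breakdown_item out) := by unfold Spec_analyze_breakdown_structure; infer_instance

-- ===== CLAIM (what is proved, stated in full; the proofs are below) =====
def Claim_equal_analyze_breakdown_structure : Prop := ∀ (breakdown_item : List (List (String × String))), Dom_analyze_breakdown_structure breakdown_item → Spec_analyze_breakdown_structure breakdown_item (analyze_breakdown_structure breakdown_item)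

-- ===== LEMMAS AND PROOFS =====

-- loop invariant: folding pvStepA over ks from a 4-bucket dict appends, per bucket,
-- exactly the keys pvClassify sends to that bucket, in order
theorem pvStepA_inv (ks : List String) (a b c e : List String) :
    (ks.foldl pvStepA (PySem.Dict.mk
        [("element", a), ("max_points", b), ("score", c), ("justification", e)])).items
    = [("element", a ++ ks.filter fun k => pvClassify k == some "element"),
       ("max_points", b ++ ks.filter fun k => pvClassify k == some "max_points"),
       ("score", c ++ ks.filter fun k => pvClassify k == some "score"),
       ("justification", e ++ ks.filter fun k => pvClassify k == some "justification")] := by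
  induction ks generalizing a b c e with
  | nil => simp
  | cons k ks ih =>
    cases h1 : pvAnyIn ["element", "criterion", "rubric", "part"] (PySem.Str.lower k) with
    | true =>
      have hc : pvClassify k = some "element" := by
        simp [pvClassify, pvCategories, h1]
      have hstep : pvStepA (PySem.Dict.mk
            [("element", a), ("max_points", b), ("score", c), ("justification", e)]) k
          = PySem.Dict.mk
            [("element", a ++ [k]), ("max_points", b), ("score", c), ("justification", e)] := by
        simp [pvStepA, h1, PySem.Dict.modify, PySem.Dict.contains, PySem.Dict.get?,
          PySem.Dict.getD, PySem.Dict.insert]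
      rw [List.foldl_cons, hstep, ih]
      simp [hc]
    | false =>
      cases h2 : pvAnyIn ["max", "maximum", "total"] (PySem.Str.lower k) with
      | true =>
        have hc : pvClassify k = some "max_points" := by
          simp [pvClassify, pvCategories, List.find?, h1, h2]
        have hstep : pvStepA (PySem.Dict.mk
              [("element", a), ("max_points", b), ("score", c), ("justification", e)]) k
            = PySem.Dict.mk
              [("element", a), ("max_points", b ++ [k]), ("score", c), ("justification", e)] := by
          simp [pvStepA, h1, h2, PySem.Dict.modify, PySem.Dict.contains, PySem.Dict.get?,
            PySem.Dict.getD, PySem.Dict.insert]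
        rw [List.foldl_cons, hstep, ih]
        simp [hc]
      | false =>
        cases h3 : pvAnyIn ["score", "student", "points", "earned"] (PySem.Str.lower k) with
        | true =>
          have hc : pvClassify k = some "score" := by
            simp [pvClassify, pvCategories, List.find?, h1, h2, h3]
          have hstep : pvStepA (PySem.Dict.mk
                [("element", a), ("max_points", b), ("score", c), ("justification", e)]) k
              = PySem.Dict.mk
                [("element", a), ("max_points", b), ("score", c ++ [k]), ("justification", e)] := by
            simp [pvStepA, h1, h2, h3, PySem.Dict.modify, PySem.Dict.contains, PySem.Dict.get?,
              PySem.Dict.getD, PySem.Dict.insert]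
          rw [List.foldl_cons, hstep, ih]
          simp [hc]
        | false =>
          cases h4 : pvAnyIn ["justification", "reason", "comment", "feedback"] (PySem.Str.lower k) with
          | true =>
            have hc : pvClassify k = some "justification" := by
              simp [pvClassify, pvCategories, List.find?, h1, h2, h3, h4]
            have hstep : pvStepA (PySem.Dict.mk
                  [("element", a), ("max_points", b), ("score", c), ("justification", e)]) k
                = PySem.Dict.mk
                  [("element", a), ("max_points", b), ("score", c), ("justification", e ++ [k])] := by
              simp [pvStepA, h1, h2, h3, h4, PySem.Dict.modify, PySem.Dict.contains,
                PySem.Dict.get?, PySem.Dict.getD, PySem.Dict.insert]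
            rw [List.foldl_cons, hstep, ih]
            simp [hc]
          | false =>
            have hc : pvClassify k = none := by
              simp [pvClassify, pvCategories, List.find?, h1, h2, h3, h4]
            have hstep : pvStepA (PySem.Dict.mk
                  [("element", a), ("max_points", b), ("score", c), ("justification", e)]) k
                = PySem.Dict.mk
                  [("element", a), ("max_points", b), ("score", c), ("justification", e)] := by
              simp [pvStepA, h1, h2, h3, h4]
            rw [List.foldl_cons, hstep, ih]
            simp [hc]

-- ===== VERDICT (by name: the statement is the Claim_ definition above) =====
theorem analyze_breakdown_structure_spec : Claim_equal_analyze_breakdown_structure := by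
  intro breakdown_item _
  unfold Spec_analyze_breakdown_structure
  match breakdown_item with
  | [] => rfl
  | first :: rest =>
    show ((PySem.Dict.ofList first : PySem.Dict String String).keys.foldl pvStepA
        (PySem.Dict.ofList [("element", []), ("max_points", []), ("score", []), ("justification", [])])).items = _
    have h0 : (PySem.Dict.ofList [("element", ([] : List String)), ("max_points", []), ("score", []), ("justification", [])])
        = PySem.Dict.mk [("element", []), ("max_points", []), ("score", []), ("justification", [])] := by decide
    rw [h0, pvStepA_inv]
    simp [analyze_breakdown_structure_alt, pvCategories, List.map]
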